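-- pv_equiv track=rewrite | github.com/MrBrantCode/unitest_baseline | mut_generate/mist_train_cf/cf_64264/solution.py | swapPrimes
-- ===== SOURCE A (Python) =====
-- def swapPrimes(lst1, lst2):
--     sieve = [True for _ in range(10**6+1)]
--     sieve[0] = sieve[1] = False
--     p = 2
--     while(p * p <= 10**6):
--         if (sieve[p] == True):
--             for i in range(p * p, 10**6+1, p):
--                 sieve[i] = False
--         p += 1
--
--     sum1 = sum(lst1)
--     sum2 = sum(lst2)
--     change = False
--
--     for i in range(len(lst1)):
--         if not sieve[lst1[i]]:
--             for j in range(len(lst2)):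
--                 if sieve[lst2[j]]:
--                     temp = lst1[i]
--                     lst1[i] = lst2[j]
--                     lst2[j] = temp
--                     change = True
--                     break
--             if change:
--                 break
--
--     if change:
--         return "YES" if sum(lst1) == sum1 and sum(lst2) == sum2 else "NO"
--     else:
--         if all(sieve[i] for i in lst1):
--             return "YES"
--         else:
--             return "NO"
-- ===== SOURCE B (Python) =====
-- def swapPrimes(lst1, lst2):
--     # The swap A performs exchanges a non-prime of lst1 with a prime of lst2;
--     # those two values are never equal, so the sum check after a swap always
--     # fails.  Hence the answer only depends on lst1: "YES" iff every element
--     # of lst1 is prime.  Test primality of the present elements directly by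
--     # trial division instead of sieving all of 10**6.
--     def is_prime(x):
--         if x < 2:
--             return False
--         d = 2
--         while d * d <= x:
--             if x % d == 0:
--                 return False
--             d += 1
--         return True
--     return "YES" if all(is_prime(x) for x in lst1) else "NO"
-- ===== Notes on version B (the rewrite author's own statement) =====
-- stated objective: faster
-- what changed: B drops the full 10**6 sieve and the swap simulation entirely: since a swapped non-prime/prime pair is never equal, the post-swap sum check always fails, so the answer is 'YES' iff every element of lst1 is prime, which B decides by trial division of just the elements present.
-- intended difference: On in-range inputs where every element of lst1 passes A's sieve lookup but some element is negative (Python's negative indexing wraps, so A accidentally treats -k as the primality of 10**6+1+(-k)+...), A returns 'YES' while B returns 'NO'; negative numbers are not prime, so B's value is the intended one. — e.g. on swapPrimes([-999998], []): A returns "YES", B returns "NO"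
-- outside the precondition, e.g. on swapPrimes([2], [10000000]): A returns 'YES', B returns 'YES'
import Mathlib
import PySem

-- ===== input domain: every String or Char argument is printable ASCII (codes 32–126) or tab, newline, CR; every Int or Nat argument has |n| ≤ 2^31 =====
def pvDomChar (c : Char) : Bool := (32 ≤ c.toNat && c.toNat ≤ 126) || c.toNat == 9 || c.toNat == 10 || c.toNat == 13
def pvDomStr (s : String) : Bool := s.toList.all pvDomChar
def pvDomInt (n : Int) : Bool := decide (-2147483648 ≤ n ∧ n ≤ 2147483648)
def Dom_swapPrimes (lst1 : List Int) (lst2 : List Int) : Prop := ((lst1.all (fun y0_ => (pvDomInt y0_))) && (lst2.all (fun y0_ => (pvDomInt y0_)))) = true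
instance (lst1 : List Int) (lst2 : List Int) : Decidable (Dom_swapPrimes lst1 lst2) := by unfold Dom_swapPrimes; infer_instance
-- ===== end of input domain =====

-- B replaces A's fixed 10^6 sieve + swap simulation by trial division of lst1's elements only
-- (the post-swap sum check can never succeed, so only lst1's primality matters): faster.
-- A mutates lst1/lst2 in place (the swap); the equivalence proved here is about the RETURN value only.

-- ===== PORT A =====
-- Python's  sieve[x]  on the sieve list (length 10^6+1): negative x counts from the
-- end (wraparound), out-of-range is IndexError = none.  Exact Python list indexing.
def pvLookup (s : Array Bool) (x : Int) : Option Bool :=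
  let j : Int := if x < 0 then x + (s.size : Int) else x
  if 0 ≤ j ∧ j < (s.size : Int) then some (s[j.toNat]?.getD false) else none

-- inner loop  for i in range(p*p, 10**6+1, p): sieve[i] = False  (the 0 < p guard only
-- makes the recursion total; every call has p ≥ 2)
def pvMark (s : Array Bool) (i p : Nat) : Array Bool :=
  if h : i ≤ 1000000 ∧ 0 < p then pvMark (s.setIfInBounds i false) (i + p) p else s
termination_by 1000001 - i
decreasing_by omega

-- while p * p <= 10**6: if sieve[p]: mark multiples; p += 1
def pvSieveLoop (s : Array Bool) (p : Nat) : Array Bool :=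
  if h : p * p ≤ 1000000 then
    pvSieveLoop (if s[p]?.getD false then pvMark s (p * p) p else s) (p + 1)
  else s
termination_by 1001 - p
decreasing_by
  have hp : p ≤ 1000 := by nlinarith
  omega

-- sieve = [True]*(10**6+1); sieve[0] = sieve[1] = False; then the marking loop
def pvSieve : Array Bool :=
  pvSieveLoop (((Array.replicate 1000001 true).setIfInBounds 0 false).setIfInBounds 1 false) 2

-- inner  for j in range(len(lst2)): if sieve[lst2[j]]: … break
-- returns none = IndexError, some none = no prime found, some (some j) = break at j
def pvInner (s : Array Bool) (l2 : List Int) (j : Nat) : Option (Option Nat) :=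
  if h : j < l2.length then
    match pvLookup s l2[j] with
    | none => none
    | some b => if b then some (some j) else pvInner s l2 (j + 1)
  else some none
termination_by l2.length - j

-- outer  for i in range(len(lst1)): …  returning the (possibly swapped) lists and `change`
def pvOuter (s : Array Bool) (l1 l2 : List Int) (i : Nat) : Option (List Int × List Int × Bool) :=
  if h : i < l1.length then
    match pvLookup s l1[i] with
    | none => none
    | some b =>
      if b then pvOuter s l1 l2 (i + 1)
      else
        match pvInner s l2 0 with
        | none => none
        | some none => pvOuter s l1 l2 (i + 1)   -- change stays False: loop goes on
        | some (some j) => some (l1.set i (l2.getD j 0), l2.set j l1[i], true)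
  else some (l1, l2, false)
termination_by l1.length - i

-- all(sieve[i] for i in lst1), short-circuiting; none = IndexError
def pvAll (s : Array Bool) (l : List Int) : Option Bool :=
  match l with
  | [] => some true
  | x :: xs =>
    match pvLookup s x with
    | none => none
    | some b => if b then pvAll s xs else some false

def swapPrimes (lst1 : List Int) (lst2 : List Int) : String :=
  let sieve := pvSieve
  let sum1 := lst1.sum
  let sum2 := lst2.sum
  match pvOuter sieve lst1 lst2 0 with
  | none => ""   -- Python raises IndexError here; excluded by Pre_swapPrimes
  | some (l1', l2', change) =>
    if change then
      if l1'.sum == sum1 && l2'.sum == sum2 then "YES" else "NO"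
    else
      match pvAll sieve l1' with
      | none => ""   -- IndexError again; excluded by Pre_swapPrimes
      | some b => if b then "YES" else "NO"

-- ===== PORT B =====
-- trial-division loop  while d*d <= x: if x % d == 0: return False; d += 1
def pvTrialLoop (x : Int) (d : Int) : Bool :=
  if h : d * d ≤ x then
    (if PySem.Int.mod x d == 0 then false else pvTrialLoop x (d + 1))
  else true
termination_by (x + 1 - d).toNat
decreasing_by
  have hdx : d ≤ x := by nlinarith [mul_self_nonneg (d - 1)]
  omega

def pvIsPrime (x : Int) : Bool := if x < 2 then false else pvTrialLoop x 2

def swapPrimes_alt (lst1 : List Int) (lst2 : List Int) : String :=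
  if lst1.all pvIsPrime then "YES" else "NO"

-- ===== PRECONDITION & SPEC =====
-- the index Python's wraparound actually reads: x itself for x ≥ 0, x + 10^6 + 1 for x < 0
def wrapIdx (x : Int) : Nat := (if x < 0 then x + 1000001 else x).toNat

-- Pre_ keeps every element of both lists inside the sieve's index range [-(10^6+1), 10^6];
-- outside it A generally raises IndexError, though A happens to return when the out-of-range
-- element is never inspected (e.g. an out-of-range lst2 element with lst1 all prime).
def Pre_swapPrimes (lst1 : List Int) (lst2 : List Int) : Prop :=
  (∀ x ∈ lst1, -1000001 ≤ x ∧ x ≤ 1000000) ∧ (∀ x ∈ lst2, -1000001 ≤ x ∧ x ≤ 1000000)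
instance (lst1 : List Int) (lst2 : List Int) : Decidable (Pre_swapPrimes lst1 lst2) := by
  unfold Pre_swapPrimes; infer_instance

def pvWitness_swapPrimes : List Int × List Int := ([2], [4])

-- On inputs where every lst1 element passes A's sieve lookup but some element is negative
-- (Python's negative indexing wraps, so A reads the primality of 10^6+1+x), A returns "YES"
-- while B returns "NO"; negative numbers are not prime, so B's value is the intended one.
def D_swapPrimes (lst1 : List Int) (lst2 : List Int) : Prop :=
  (∀ x ∈ lst1, Nat.Prime (wrapIdx x)) ∧ (∃ x ∈ lst1, x < 0)
instance (lst1 : List Int) (lst2 : List Int) : Decidable (D_swapPrimes lst1 lst2) := by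
  unfold D_swapPrimes; infer_instance

def Spec_swapPrimes (lst1 : List Int) (lst2 : List Int) (out : String) : Prop :=
  ¬ D_swapPrimes lst1 lst2 → out = swapPrimes_alt lst1 lst2
instance (lst1 : List Int) (lst2 : List Int) (out : String) : Decidable (Spec_swapPrimes lst1 lst2 out) := by
  unfold Spec_swapPrimes; infer_instance

def pvDiffWitness_swapPrimes : List Int × List Int := ([-999998], [])
def pvDiffWitnessOut_swapPrimes : String × String := ("YES", "NO")

-- ===== CLAIM (what is proved, stated in full; the proofs are below) =====
def Claim_unchanged_swapPrimes : Prop := ∀ (lst1 : List Int) (lst2 : List Int), Dom_swapPrimes lst1 lst2 → Pre_swapPrimes lst1 lst2 → Spec_swapPrimes lst1 lst2 (swapPrimes lst1 lst2)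
def Claim_changed_swapPrimes : Prop := Dom_swapPrimes (pvDiffWitness_swapPrimes.1) (pvDiffWitness_swapPrimes.2) ∧ Pre_swapPrimes (pvDiffWitness_swapPrimes.1) (pvDiffWitness_swapPrimes.2) ∧ D_swapPrimes (pvDiffWitness_swapPrimes.1) (pvDiffWitness_swapPrimes.2) ∧ swapPrimes (pvDiffWitness_swapPrimes.1) (pvDiffWitness_swapPrimes.2) = pvDiffWitnessOut_swapPrimes.1 ∧ swapPrimes_alt (pvDiffWitness_swapPrimes.1) (pvDiffWitness_swapPrimes.2) = pvDiffWitnessOut_swapPrimes.2 ∧ pvDiffWitnessOut_swapPrimes.1 ≠ pvDiffWitnessOut_swapPrimes.2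
def Claim_exact_swapPrimes : Prop := ∀ (lst1 : List Int) (lst2 : List Int), Dom_swapPrimes lst1 lst2 → Pre_swapPrimes lst1 lst2 → D_swapPrimes lst1 lst2 → swapPrimes lst1 lst2 ≠ swapPrimes_alt lst1 lst2

-- ===== LEMMAS AND PROOFS =====

theorem pv_getq (a : Array Bool) (i j : Nat) (v : Bool) :
    (a.setIfInBounds i v)[j]? = if i = j ∧ j < a.size then some v else a[j]? := by
  simp [Array.getElem?_setIfInBounds]
  split_ifs with h1 h2 h3 h4 <;> simp_all

theorem pv_sum_set (l : List Int) (n : Nat) (a : Int) (h : n < l.length) :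
    (l.set n a).sum = l.sum - l[n] + a := by
  induction l generalizing n with
  | nil => simp at h
  | cons x xs ih =>
    cases n with
    | zero => simp [List.set]; ring
    | succ m =>
      simp only [List.set, List.sum_cons, List.getElem_cons_succ]
      rw [ih m (by simpa using h)]; ring

theorem prime_iff_trial (p : Nat) : p.Prime ↔ 2 ≤ p ∧ ∀ m, 2 ≤ m → m * m ≤ p → ¬ m ∣ p := by
  rw [Nat.prime_def_le_sqrt]
  constructor
  · rintro ⟨h2, h⟩
    refine ⟨h2, fun m hm hmp => h m hm ?_⟩
    rw [Nat.le_sqrt]; exact hmp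
  · rintro ⟨h2, h⟩
    refine ⟨h2, fun m hm hmp => h m hm ?_⟩
    rw [Nat.le_sqrt] at hmp; exact hmp

theorem pvMark_size (s : Array Bool) (i p : Nat) : (pvMark s i p).size = s.size := by
  fun_induction pvMark with
  | case1 s i h ih => rw [ih]; simp
  | case2 => rfl

theorem pvMark_get (s : Array Bool) (i p : Nat) (hs : s.size = 1000001) (k : Nat) :
    (pvMark s i p)[k]? =
      if i ≤ k ∧ p ∣ (k - i) ∧ k ≤ 1000000 ∧ 0 < p then some false else s[k]? := by
  induction s, i using pvMark.induct (p := p) with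
  | case1 s i h ih =>
    rw [pvMark, dif_pos h, ih (by simp [hs]), pv_getq]
    by_cases hik : k = i
    · subst hik
      rw [if_neg (fun hc => absurd hc.1 (by omega)), if_pos ⟨rfl, by omega⟩,
        if_pos ⟨le_refl k, by simp, h.1, h.2⟩]
    · have hiff : (i + p ≤ k ∧ p ∣ (k - (i+p)) ∧ k ≤ 1000000 ∧ 0 < p) ↔
          (i ≤ k ∧ p ∣ (k - i) ∧ k ≤ 1000000 ∧ 0 < p) := by
        constructor
        · rintro ⟨ha, ⟨m, hm⟩, hb, hc⟩
          have h2 : p * (m + 1) = p * m + p := by ring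
          exact ⟨by omega, ⟨m + 1, by omega⟩, hb, hc⟩
        · rintro ⟨ha, ⟨m, hm⟩, hb, hc⟩
          have hm0 : m ≠ 0 := by rintro rfl; simp at hm; omega
          obtain ⟨m', rfl⟩ : ∃ m', m = m' + 1 := ⟨m - 1, by omega⟩
          have h2 : p * (m' + 1) = p * m' + p := by ring
          exact ⟨by omega, ⟨m', by omega⟩, hb, hc⟩
      simp only [hiff]
      split_ifs with hc h2
      · rfl
      · exact absurd h2.1.symm hik
      · rfl
  | case2 s i h =>
    rw [pvMark, dif_neg h, if_neg (fun hc => h ⟨by omega, hc.2.2.2⟩)]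

-- invariant of the outer sieve loop at counter p
def sieveInv (p : Nat) (s : Array Bool) : Prop :=
  s.size = 1000001 ∧ ∀ k, k ≤ 1000000 →
    (s[k]?.getD false = true ↔ 2 ≤ k ∧ ∀ q, Nat.Prime q → q < p → ¬(q ∣ k ∧ q * q ≤ k))

theorem sieveInv_init :
    sieveInv 2 (((Array.replicate 1000001 true).setIfInBounds 0 false).setIfInBounds 1 false) := by
  constructor
  · simp
  · intro k hk
    rw [pv_getq, pv_getq]
    have hsz : ((Array.replicate 1000001 true).setIfInBounds 0 false).size = 1000001 := by simp
    constructor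
    · intro ht
      split_ifs at ht with h1 h2 <;> simp_all
      · refine ⟨by omega, fun q hq hql => absurd hq.two_le (by omega)⟩
    · rintro ⟨h2k, -⟩
      rw [if_neg (by omega), if_neg (by omega)]
      have hklt : k < 1000001 := by omega
      simp [Array.getElem?_replicate, hklt]

theorem sieveInv_step (s : Array Bool) (p : Nat) (hp : 2 ≤ p) (hpp : p * p ≤ 1000000)
    (hinv : sieveInv p s) :
    sieveInv (p + 1) (if s[p]?.getD false then pvMark s (p * p) p else s) := by
  have hple : p ≤ 1000000 := by nlinarith
  have hppos : 0 < p := by omega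
  by_cases hb : s[p]?.getD false = true
  · rw [if_pos hb]
    -- p survived: p is prime
    have hvp := (hinv.2 p hple).mp hb
    have hprime : Nat.Prime p := by
      by_contra hnp
      have hq := Nat.minFac_prime (show p ≠ 1 by omega)
      have hqd : p.minFac ∣ p := Nat.minFac_dvd p
      have hqsq : p.minFac * p.minFac ≤ p := by
        have := Nat.minFac_sq_le_self (show 0 < p by omega) hnp
        nlinarith [this]
      have hqlt : p.minFac < p := by
        have hle : p.minFac ≤ p := Nat.le_of_dvd (by omega) hqd
        rcases Nat.lt_or_ge p.minFac p with h | h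
        · exact h
        · have : p.minFac = p := by omega
          rw [this] at hqsq; nlinarith
      exact hvp.2 p.minFac hq hqlt ⟨hqd, hqsq⟩
    refine ⟨by rw [pvMark_size]; exact hinv.1, fun k hk => ?_⟩
    rw [pvMark_get s (p*p) p hinv.1 k]
    have hmarkiff : (p * p ≤ k ∧ p ∣ (k - p * p) ∧ k ≤ 1000000 ∧ 0 < p) ↔ (p ∣ k ∧ p * p ≤ k) := by
      constructor
      · rintro ⟨h1, h2, -, -⟩
        refine ⟨?_, h1⟩
        have hkk : k = (k - p * p) + p * p := by omega
        rw [hkk]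
        exact Nat.dvd_add h2 (Dvd.intro p rfl)
      · rintro ⟨h1, h2⟩
        exact ⟨h2, Nat.dvd_sub h1 (Dvd.intro p rfl), hk, hppos⟩
    have hqsucc : ∀ q, q < p + 1 ↔ q < p ∨ q = p := by omega
    split_ifs with hc
    · -- k is marked: both sides false
      rw [hmarkiff] at hc
      constructor
      · intro h; simp at h
      · rintro ⟨-, hall⟩
        exact absurd (hall p hprime (by omega)) (by simp [hc.1, hc.2])
    · rw [hmarkiff] at hc
      rw [hinv.2 k hk]
      constructor
      · rintro ⟨h2k, hall⟩
        refine ⟨h2k, fun q hq hql => ?_⟩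
        rcases (hqsucc q).mp hql with h | h
        · exact hall q hq h
        · subst h; exact fun hx => hc hx
      · rintro ⟨h2k, hall⟩
        exact ⟨h2k, fun q hq hql => hall q hq (by omega)⟩
  · rw [if_neg hb]
    -- p already crossed out: p is composite, nothing changes
    have hnp : ¬ Nat.Prime p := by
      intro hprime
      have := hinv.2 p hple
      rw [Bool.not_eq_true] at hb
      rw [hb] at this
      simp only [Bool.false_eq_true, false_iff] at this
      push_neg at this
      obtain ⟨q, hq, hql, hqd, -⟩ := this (by omega)
      have := (Nat.Prime.eq_one_or_self_of_dvd hprime q hqd).resolve_left (by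
        intro h1; exact absurd (h1 ▸ hq.two_le) (by omega))
      omega
    refine ⟨hinv.1, fun k hk => ?_⟩
    rw [hinv.2 k hk]
    constructor
    · rintro ⟨h2k, hall⟩
      refine ⟨h2k, fun q hq hql => ?_⟩
      rcases Nat.lt_succ_iff_lt_or_eq.mp hql with h | h
      · exact hall q hq h
      · subst h; exact absurd hq hnp
    · rintro ⟨h2k, hall⟩
      exact ⟨h2k, fun q hq hql => hall q hq (by omega)⟩

theorem pvSieveLoop_correct (s : Array Bool) (p : Nat) (hp : 2 ≤ p) (hinv : sieveInv p s) :
    (pvSieveLoop s p).size = 1000001 ∧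
    ∀ k, k ≤ 1000000 → ((pvSieveLoop s p)[k]?.getD false = true ↔ Nat.Prime k) := by
  induction s, p using pvSieveLoop.induct with
  | case1 s p h ih =>
    rw [pvSieveLoop, dif_pos h]
    exact ih (by omega) (sieveInv_step s p hp h hinv)
  | case2 s p h =>
    rw [pvSieveLoop, dif_neg h]
    refine ⟨hinv.1, fun k hk => ?_⟩
    rw [hinv.2 k hk]
    constructor
    · rintro ⟨h2k, hall⟩
      by_contra hnp
      have hq := Nat.minFac_prime (show k ≠ 1 by omega)
      have hqd : k.minFac ∣ k := Nat.minFac_dvd k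
      have hqsq : k.minFac * k.minFac ≤ k := by
        have := Nat.minFac_sq_le_self (show 0 < k by omega) hnp
        nlinarith [this]
      have hqlt : k.minFac < p := by
        by_contra hge
        push_neg at hge
        have : p * p ≤ k.minFac * k.minFac := Nat.mul_le_mul hge hge
        omega
      exact hall k.minFac hq hqlt ⟨hqd, hqsq⟩
    · intro hprime
      refine ⟨hprime.two_le, fun q hq hql ⟨hqd, hqsq⟩ => ?_⟩
      have := (Nat.Prime.eq_one_or_self_of_dvd hprime q hqd).resolve_left (by
        intro h1; exact absurd (h1 ▸ hq.two_le) (by omega))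
      subst this
      nlinarith [hprime.two_le]

theorem pvSieve_size : pvSieve.size = 1000001 :=
  (pvSieveLoop_correct _ 2 (by omega) sieveInv_init).1

theorem pvSieve_correct (k : Nat) (hk : k ≤ 1000000) :
    (pvSieve[k]?.getD false = true ↔ Nat.Prime k) :=
  (pvSieveLoop_correct _ 2 (by omega) sieveInv_init).2 k hk

theorem wrapIdx_le (x : Int) (h1 : -1000001 ≤ x) (h2 : x ≤ 1000000) : wrapIdx x ≤ 1000000 := by
  unfold wrapIdx; split_ifs <;> omega

theorem pvLookup_correct (x : Int) (h1 : -1000001 ≤ x) (h2 : x ≤ 1000000) :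
    pvLookup pvSieve x = some (decide (Nat.Prime (wrapIdx x))) := by
  unfold pvLookup
  rw [pvSieve_size]
  simp only [Nat.cast_ofNat]
  have hj : (if x < 0 then x + (1000001 : Int) else x) ≥ 0 ∧
      (if x < 0 then x + (1000001 : Int) else x) < 1000001 := by split_ifs <;> omega
  rw [if_pos ⟨hj.1, hj.2⟩]
  congr 1
  have hwk : (if x < 0 then x + (1000001 : Int) else x).toNat = wrapIdx x := rfl
  rw [hwk]
  have hc := pvSieve_correct (wrapIdx x) (wrapIdx_le x h1 h2)
  cases hb : pvSieve[wrapIdx x]?.getD false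
  · rw [hb] at hc; simp only [Bool.false_eq_true, false_iff] at hc; simp [hc]
  · rw [hb] at hc; simp only [true_iff] at hc; simp [hc]

theorem pvAll_spec (l : List Int) (h : ∀ x ∈ l, -1000001 ≤ x ∧ x ≤ 1000000) :
    pvAll pvSieve l = some (l.all (fun x => decide (Nat.Prime (wrapIdx x)))) := by
  induction l with
  | nil => rfl
  | cons x xs ih =>
    have hx := h x (by simp)
    rw [pvAll, pvLookup_correct x hx.1 hx.2]
    by_cases hp : Nat.Prime (wrapIdx x)
    · have hd : decide (Nat.Prime (wrapIdx x)) = true := by simpa using hp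
      simp [hd, ih (fun y hy => h y (by simp [hy]))]
    · have hd : decide (Nat.Prime (wrapIdx x)) = false := by simpa using hp
      simp [hd]

theorem pvInner_spec (l2 : List Int) (h : ∀ x ∈ l2, -1000001 ≤ x ∧ x ≤ 1000000) (j : Nat) :
    pvInner pvSieve l2 j = some none ∨
    ∃ j0, pvInner pvSieve l2 j = some (some j0) ∧ j0 < l2.length ∧
      Nat.Prime (wrapIdx (l2.getD j0 0)) := by
  induction j using pvInner.induct (s := pvSieve) (l2 := l2) with
  | case1 j hj heq =>
    have hx := h l2[j] (List.getElem_mem hj)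
    rw [pvLookup_correct _ hx.1 hx.2] at heq
    exact absurd heq (by simp)
  | case2 j hj heq =>
    have hx := h l2[j] (List.getElem_mem hj)
    rw [pvLookup_correct _ hx.1 hx.2] at heq
    have hd : decide (Nat.Prime (wrapIdx l2[j])) = true := Option.some.inj heq
    refine Or.inr ⟨j, ?_, hj, ?_⟩
    · rw [pvInner, dif_pos hj, pvLookup_correct _ hx.1 hx.2, hd]
      rfl
    · rw [List.getD_eq_getElem l2 0 hj]
      simpa using hd
  | case3 j hj b heq hb ih =>
    simp only [Bool.not_eq_true] at hb
    subst hb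
    rw [pvInner, dif_pos hj, heq]
    exact ih
  | case4 j hj =>
    rw [pvInner, dif_neg hj]
    exact Or.inl rfl

theorem pvOuter_spec (l1 l2 : List Int)
    (h1 : ∀ x ∈ l1, -1000001 ≤ x ∧ x ≤ 1000000)
    (h2 : ∀ x ∈ l2, -1000001 ≤ x ∧ x ≤ 1000000) (i : Nat) :
    pvOuter pvSieve l1 l2 i = some (l1, l2, false) ∨
    ∃ i0 j0, i0 < l1.length ∧ j0 < l2.length ∧
      ¬ Nat.Prime (wrapIdx (l1.getD i0 0)) ∧ Nat.Prime (wrapIdx (l2.getD j0 0)) ∧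
      pvOuter pvSieve l1 l2 i =
        some (l1.set i0 (l2.getD j0 0), l2.set j0 (l1.getD i0 0), true) := by
  induction i using pvOuter.induct (s := pvSieve) (l1 := l1) (l2 := l2) with
  | case1 i hi heq =>
    have hx := h1 l1[i] (List.getElem_mem hi)
    rw [pvLookup_correct _ hx.1 hx.2] at heq
    exact absurd heq (by simp)
  | case2 i hi heq ih =>
    rw [pvOuter, dif_pos hi, heq]
    exact ih
  | case3 i hi b heq hb hinner =>
    rcases pvInner_spec l2 h2 0 with hsp | ⟨j0, hsp, -, -⟩ <;> rw [hsp] at hinner <;> cases hinner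
  | case4 i hi b heq hb hinner ih =>
    simp only [Bool.not_eq_true] at hb
    subst hb
    rw [pvOuter, dif_pos hi, heq, hinner]
    exact ih
  | case5 i hi b heq hb j0 hinner =>
    simp only [Bool.not_eq_true] at hb
    subst hb
    have hx := h1 l1[i] (List.getElem_mem hi)
    rw [pvLookup_correct _ hx.1 hx.2] at heq
    have hnpi : ¬ Nat.Prime (wrapIdx l1[i]) := by
      injection heq with h'
      intro hc
      rw [decide_eq_true hc] at h'
      cases h'
    rcases pvInner_spec l2 h2 0 with hsp | ⟨j1, hsp, hj1, hpj⟩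
    · rw [hsp] at hinner; cases hinner
    · rw [hsp] at hinner
      injection hinner with h'
      injection h' with h''
      subst h''
      have hd : decide (Nat.Prime (wrapIdx l1[i])) = false := by simpa using hnpi
      refine Or.inr ⟨i, j1, hi, hj1, ?_, hpj, ?_⟩
      · rw [List.getD_eq_getElem l1 0 hi]; exact hnpi
      · rw [pvOuter, dif_pos hi, pvLookup_correct _ hx.1 hx.2, hd, hsp,
          List.getD_eq_getElem l1 0 hi]
        rfl
  | case6 i hi =>
    rw [pvOuter, dif_neg hi]
    exact Or.inl rfl

-- A's return value, characterised: "YES" iff every lst1 element passes the (wraparound) sieve test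
theorem swapPrimes_char (l1 l2 : List Int) (hpre : Pre_swapPrimes l1 l2) :
    swapPrimes l1 l2 =
      if l1.all (fun x => decide (Nat.Prime (wrapIdx x))) then "YES" else "NO" := by
  have hunfold : swapPrimes l1 l2 =
      (match pvOuter pvSieve l1 l2 0 with
      | none => ""
      | some (l1', l2', change) =>
        if change then
          if l1'.sum == l1.sum && l2'.sum == l2.sum then "YES" else "NO"
        else
          match pvAll pvSieve l1' with
          | none => ""
          | some b => if b then "YES" else "NO") := rfl
  rw [hunfold]
  rcases pvOuter_spec l1 l2 hpre.1 hpre.2 0 with heq | ⟨i0, j0, hi0, hj0, hnp, hpr, heq⟩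
  · simp only [heq]
    rw [pvAll_spec l1 hpre.1]
    cases l1.all (fun x => decide (Nat.Prime (wrapIdx x))) <;> simp
  · simp only [heq]
    have hne : l2.getD j0 0 ≠ l1.getD i0 0 := by
      intro hcontra
      rw [hcontra] at hpr
      exact hnp hpr
    have hsum : (l1.set i0 (l2.getD j0 0)).sum ≠ l1.sum := by
      rw [pv_sum_set l1 i0 _ hi0]
      rw [List.getD_eq_getElem l1 0 hi0] at hne
      omega
    have hbeq : ((l1.set i0 (l2.getD j0 0)).sum == l1.sum) = false := beq_false_of_ne hsum
    rw [hbeq, Bool.false_and]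
    have hmem : l1.getD i0 0 ∈ l1 := by
      rw [List.getD_eq_getElem l1 0 hi0]; exact List.getElem_mem hi0
    have hall : l1.all (fun x => decide (Nat.Prime (wrapIdx x))) = false := by
      rw [List.all_eq_false]
      exact ⟨l1.getD i0 0, hmem, by simpa using hnp⟩
    rw [hall]
    simp

theorem pvTrialLoop_spec (x d : Int) (hx : 2 ≤ x) (hd : 2 ≤ d) :
    pvTrialLoop x d = true ↔ ∀ e : Int, d ≤ e → e * e ≤ x → ¬ e ∣ x := by
  induction d using pvTrialLoop.induct (x := x) with
  | case1 d hdd hmod =>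
    -- x % d == 0 is true: d divides x
    rw [pvTrialLoop, dif_pos hdd, if_pos hmod]
    have hdvd : d ∣ x := by
      rw [← PySem.Int.mod_eq_zero_iff_dvd]
      simpa using hmod
    simp only [Bool.false_eq_true, false_iff]
    intro hall
    exact hall d le_rfl hdd hdvd
  | case2 d hdd hmod ih =>
    rw [pvTrialLoop, dif_pos hdd, if_neg hmod]
    have hndvd : ¬ d ∣ x := by
      rw [← PySem.Int.mod_eq_zero_iff_dvd]
      simpa using hmod
    rw [ih (by omega)]
    constructor
    · intro hall e hde hee
      rcases eq_or_lt_of_le hde with hcase | hcase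
      · subst hcase; exact hndvd
      · exact hall e (by omega) hee
    · intro hall e hde hee
      exact hall e (by omega) hee
  | case3 d hdd =>
    rw [pvTrialLoop, dif_neg hdd]
    simp only [true_iff]
    intro e hde hee hdvd
    have : d * d ≤ e * e := by nlinarith
    omega
  
theorem pvIsPrime_spec (x : Int) : pvIsPrime x = decide (Nat.Prime x.toNat) := by
  by_cases hx : x < 2
  · rw [pvIsPrime, if_pos hx]
    have hnp : ¬ Nat.Prime x.toNat := by
      intro hp
      have := hp.two_le
      omega
    simp [hnp]
  · push_neg at hx
    rw [pvIsPrime, if_neg (by omega)]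
    have hspec := pvTrialLoop_spec x 2 hx le_rfl
    have hxn : ((x.toNat : Int)) = x := Int.toNat_of_nonneg (by omega)
    cases hb : pvTrialLoop x 2 with
    | true =>
      symm
      simp only [decide_eq_true_eq]
      rw [prime_iff_trial]
      refine ⟨by omega, fun m h2m hmm hmd => ?_⟩
      refine (hspec.mp hb) (m : Int) (by exact_mod_cast h2m) ?_ ?_
      · rw [← hxn]; exact_mod_cast hmm
      · rw [← hxn]; exact_mod_cast hmd
    | false =>
      symm
      rw [decide_eq_false_iff_not]
      intro hp
      have htr : pvTrialLoop x 2 = true := by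
        rw [hspec]
        intro e hde hee hdvd
        have he0 : 0 ≤ e := by omega
        have htrial := (prime_iff_trial x.toNat).mp hp
        refine htrial.2 e.toNat (by omega) ?_ ?_
        · have h' : ((e.toNat : Int)) * ((e.toNat : Int)) ≤ ((x.toNat : Int)) := by
            rw [hxn, Int.toNat_of_nonneg he0]
            exact hee
          exact_mod_cast h'
        · have h' : ((e.toNat : Int)) ∣ ((x.toNat : Int)) := by
            rw [hxn, Int.toNat_of_nonneg he0]
            exact hdvd
          exact_mod_cast h'
      rw [htr] at hb
      cases hb

theorem pvNegNotPrime (x : Int) (hx : x < 0) : pvIsPrime x = false := by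
  rw [pvIsPrime, if_pos (by omega)]

-- ===== VERDICT (by name: the statements are the Claim_ definitions above) =====
theorem swapPrimes_spec : Claim_unchanged_swapPrimes := by
  intro l1 l2 hdom hpre
  unfold Spec_swapPrimes
  intro hnd
  rw [swapPrimes_char l1 l2 hpre]
  unfold swapPrimes_alt
  by_cases hneg : ∀ x ∈ l1, 0 ≤ x
  · have hagree : ∀ x ∈ l1, decide (Nat.Prime (wrapIdx x)) = pvIsPrime x := by
      intro x hxl
      rw [pvIsPrime_spec]
      have hw : wrapIdx x = x.toNat := by
        unfold wrapIdx
        rw [if_neg (by have := hneg x hxl; omega)]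
      rw [hw]
    have hfg : l1.all (fun x => decide (Nat.Prime (wrapIdx x))) = l1.all pvIsPrime := by
      rw [Bool.eq_iff_iff]
      simp only [List.all_eq_true]
      constructor
      · intro hh x hx; rw [← hagree x hx]; exact hh x hx
      · intro hh x hx; rw [hagree x hx]; exact hh x hx
    rw [hfg]
  · push_neg at hneg
    obtain ⟨x0, hx0l, hx0n⟩ := hneg
    have hnall : ¬ ∀ x ∈ l1, Nat.Prime (wrapIdx x) := by
      intro hall
      exact hnd ⟨hall, x0, hx0l, hx0n⟩
    push_neg at hnall
    obtain ⟨x1, hx1l, hx1n⟩ := hnall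
    have hA : l1.all (fun x => decide (Nat.Prime (wrapIdx x))) = false := by
      rw [List.all_eq_false]
      exact ⟨x1, hx1l, by simpa using hx1n⟩
    have hB : l1.all pvIsPrime = false := by
      rw [List.all_eq_false]
      by_cases hx1s : x1 < 0
      · exact ⟨x1, hx1l, by simp [pvNegNotPrime x1 hx1s]⟩
      · refine ⟨x1, hx1l, ?_⟩
        rw [pvIsPrime_spec]
        have : wrapIdx x1 = x1.toNat := by
          unfold wrapIdx
          rw [if_neg hx1s]
        rw [this] at hx1n
        simpa using hx1n
    rw [hA, hB]

theorem swapPrimes_changed : Claim_changed_swapPrimes := by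
  unfold Claim_changed_swapPrimes
  refine ⟨by decide, by decide, ?_, ?_, by decide, by decide⟩
  · refine ⟨?_, ⟨-999998, by simp [pvDiffWitness_swapPrimes], by norm_num⟩⟩
    intro x hx
    simp only [pvDiffWitness_swapPrimes] at hx
    rw [List.mem_singleton] at hx
    subst hx
    show Nat.Prime (wrapIdx (-999998))
    have : wrapIdx (-999998) = 3 := by decide
    rw [this]
    norm_num
  · show swapPrimes [-999998] [] = "YES"
    rw [swapPrimes_char [-999998] [] (by constructor <;> intro x hx <;> simp_all <;> omega)]
    have h3 : wrapIdx (-999998) = 3 := by decide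
    have : ([-999998] : List Int).all (fun x => decide (Nat.Prime (wrapIdx x))) = true := by
      simp only [List.all_cons, List.all_nil, Bool.and_true]
      rw [h3]
      norm_num
    rw [this, if_pos rfl]

theorem swapPrimes_tight : Claim_exact_swapPrimes := by
  intro l1 l2 hdom hpre hd
  obtain ⟨hall, x0, hx0l, hx0n⟩ := hd
  rw [swapPrimes_char l1 l2 hpre]
  have hA : l1.all (fun x => decide (Nat.Prime (wrapIdx x))) = true := by
    rw [List.all_eq_true]
    intro x hxl
    simpa using hall x hxl
  rw [hA, if_pos rfl]
  unfold swapPrimes_alt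
  have hB : l1.all pvIsPrime = false := by
    rw [List.all_eq_false]
    exact ⟨x0, hx0l, by simp [pvNegNotPrime x0 hx0n]⟩
  rw [hB]
  simp
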